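-- pv_equiv track=rewrite | github.com/denisefavila/training | interview/interview/number_of_decreasing_subsequences.py | get_number_of_decreasing_subsequences
-- ===== SOURCE A (Python) =====
-- from typing import List
--
-- def get_number_of_decreasing_subsequences(nums: List[int]):
--     """
--
--     Given an int array nums of length n. Split it into strictly decreasing subsequences.
--     Output the min number of subsequences you can get by splitting.
--
--     Example 1:
--
--     Input: [5, 2, 4, 3, 1, 6]
--     Output: 3
--
--     Example 2:
--     Input: [2, 9, 12, 13, 4, 7, 6, 5, 10]
--     Output: 4
--
--     Example 3:
--     Input: [1, 1, 1]
--     Output: 3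
--
--     """
--     if nums is None or len(nums) == 0:
--         return 0
--
--     subsequences = []
--
--     for num in nums:
--         if not subsequences:
--             subsequences.append(num)
--         else:
--             index = -1
--             start, end = 0, len(subsequences) - 1
--
--             while start <= end:
--                 mid = (start + end) // 2
--                 if subsequences[mid] > num:
--                     index = mid
--                     end = mid - 1
--                 else:
--                     start = mid + 1
--
--             if index != -1:
--                 subsequences[index] = num
--             else:
--                 subsequences.append(num)
--
--     return len(subsequences)
-- ===== SOURCE B (Python) =====
-- def get_number_of_decreasing_subsequences(nums):
--     # O(n^2) DP: length of the longest non-decreasing subsequence (= min number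
--     # of strictly decreasing subsequences), no tails array / binary search.
--     if nums is None or len(nums) == 0:
--         return 0
--     dp = []  # pairs (value, length of longest non-decreasing subsequence ending there)
--     best_overall = 0
--     for x in nums:
--         best = 0
--         for v, d in dp:
--             if v <= x and d > best:
--                 best = d
--         dp.append((x, best + 1))
--         if best + 1 > best_overall:
--             best_overall = best + 1
--     return best_overall
-- ===== Notes on version B (the rewrite author's own statement) =====
-- stated objective: simpler
-- what changed: Replaced patience sorting (tails array maintained with a hand-written binary search) by a plain quadratic DP that tracks, for each element, the length of the longest non-decreasing subsequence ending there, returning the running maximum.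
import Mathlib
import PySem

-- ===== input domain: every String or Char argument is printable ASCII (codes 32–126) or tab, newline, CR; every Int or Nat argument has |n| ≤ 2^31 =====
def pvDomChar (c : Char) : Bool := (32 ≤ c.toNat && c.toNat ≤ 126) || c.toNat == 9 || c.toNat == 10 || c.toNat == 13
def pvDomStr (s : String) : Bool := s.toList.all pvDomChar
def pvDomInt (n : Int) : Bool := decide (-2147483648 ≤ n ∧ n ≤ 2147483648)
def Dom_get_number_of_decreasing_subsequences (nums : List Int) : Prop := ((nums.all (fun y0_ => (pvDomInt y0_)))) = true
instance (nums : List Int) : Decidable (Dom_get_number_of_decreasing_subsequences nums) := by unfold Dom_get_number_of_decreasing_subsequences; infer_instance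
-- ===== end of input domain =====

-- B replaces A's patience-sorting tails array + binary search by a plain
-- quadratic longest-non-decreasing-subsequence DP (objective: simpler).

-- ===== PORT A =====
-- the while-loop of A's binary search; fuel only makes the loop total (it is
-- called with fuel = len + 1, more than the loop can ever iterate)
def pvBisect (t : List Int) (x : Int) : Nat → Int → Int → Int → Int
  | 0, _, _, index => index
  | fuel + 1, start, stop, index =>
    if start ≤ stop then
      let mid := PySem.Int.floordiv (start + stop) 2
      -- subsequences[mid]: mid is always in range here, so the default is never used
      if x < PySem.List.pyGetD t mid 0 then
        pvBisect t x fuel start (mid - 1) mid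
      else
        pvBisect t x fuel (mid + 1) stop index
    else index

def pvStepA (subs : List Int) (num : Int) : List Int :=
  if subs.length = 0 then subs ++ [num]
  else
    let index := pvBisect subs num (subs.length + 1) 0 ((subs.length : Int) - 1) (-1)
    if index ≠ -1 then subs.set index.toNat num
    else subs ++ [num]

def get_number_of_decreasing_subsequences (nums : List Int) : Int :=
  if nums.length = 0 then 0
  else ((nums.foldl pvStepA []).length : Int)

-- ===== PORT B =====
-- inner loop of Source B: best = max dp value among earlier elements ≤ x (0 if none)
def pvBest (dp : List (Int × Int)) (x : Int) : Int :=
  dp.foldl (fun best p => if p.1 ≤ x ∧ best < p.2 then p.2 else best) 0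

-- one iteration of Source B's outer loop; state = (dp pairs, best_overall)
def pvStepB (st : List (Int × Int) × Int) (x : Int) : List (Int × Int) × Int :=
  let best := pvBest st.1 x
  (st.1 ++ [(x, best + 1)], if st.2 < best + 1 then best + 1 else st.2)

def get_number_of_decreasing_subsequences_alt (nums : List Int) : Int :=
  if nums.length = 0 then 0
  else (nums.foldl pvStepB ([], 0)).2

-- ===== PRECONDITION & SPEC =====
def Spec_get_number_of_decreasing_subsequences (nums : List Int) (out : Int) : Prop := out = get_number_of_decreasing_subsequences_alt nums
instance (nums : List Int) (out : Int) : Decidable (Spec_get_number_of_decreasing_subsequences nums out) := by unfold Spec_get_number_of_decreasing_subsequences; infer_instance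

-- ===== CLAIM (what is proved, stated in full; the proofs are below) =====
def Claim_equal_get_number_of_decreasing_subsequences : Prop := ∀ (nums : List Int), Dom_get_number_of_decreasing_subsequences nums → Spec_get_number_of_decreasing_subsequences nums (get_number_of_decreasing_subsequences nums)

-- ===== LEMMAS AND PROOFS =====

-- K is the split point of (sorted) t around x: entries below K are ≤ x, from K on are > x
def pvSplit (t : List Int) (x : Int) (K : Nat) : Prop :=
  K ≤ t.length ∧ (∀ i, i < K → t.getD i 0 ≤ x) ∧ (∀ i, K ≤ i → i < t.length → x < t.getD i 0)

-- A's binary search returns the split point (or -1 if everything is ≤ x)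
lemma pvBisect_eq (t : List Int) (x : Int) (K : Nat) (hs : pvSplit t x K) :
    ∀ (fuel : Nat) (start stop index : Int), 0 ≤ start → start ≤ (K : Int) →
      (K : Int) ≤ stop + 1 → stop ≤ (t.length : Int) - 1 →
      ((index = -1 ∧ stop = (t.length : Int) - 1) ∨
        (index = stop + 1 ∧ index ≤ (t.length : Int) - 1)) →
      (stop + 1 - start).toNat < fuel →
      pvBisect t x fuel start stop index = if K < t.length then (K : Int) else -1 := by
  obtain ⟨hK, hS1, hS2⟩ := hs
  intro fuel
  induction fuel with
  | zero => intro start stop index _ _ _ _ _ hf; omega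
  | succ n ih =>
    intro start stop index h0 h1 h2 h3 h4 hf
    simp only [pvBisect]
    by_cases hss : start ≤ stop
    · rw [if_pos hss]
      have hb := PySem.Int.floordiv_two_mid_bounds hss
      set mid := PySem.Int.floordiv (start + stop) 2 with hmid
      have hmid0 : 0 ≤ mid := le_trans h0 hb.1
      have hmidlen : mid < (t.length : Int) := by omega
      have hget : PySem.List.pyGetD t mid 0 = t.getD mid.toNat 0 := by
        rw [PySem.List.pyGetD_eq_getElem t 0 hmid0 hmidlen, List.getD_eq_getElem]
      rw [hget]
      by_cases hcmp : x < t.getD mid.toNat 0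
      · rw [if_pos hcmp]
        have hKm : (K : Int) ≤ mid := by
          by_contra hlt
          have : mid.toNat < K := by omega
          have := hS1 mid.toNat this
          omega
        exact ih start (mid - 1) mid h0 h1 (by omega) (by omega)
          (Or.inr ⟨by omega, by omega⟩) (by omega)
      · rw [if_neg hcmp]
        have hmK : mid + 1 ≤ (K : Int) := by
          by_contra hlt
          have hKm : K ≤ mid.toNat := by omega
          have := hS2 mid.toNat hKm (by omega)
          omega
        exact ih (mid + 1) stop index (by omega) (by omega) h2 h3 h4 (by omega)
    · rw [if_neg hss]
      have hKeq : (K : Int) = stop + 1 := by omega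
      rcases h4 with ⟨hidx, hstop⟩ | ⟨hidx, hlt⟩
      · have hKlen : ¬ K < t.length := by omega
        rw [if_neg hKlen, hidx]
      · have hKlen : K < t.length := by omega
        rw [if_pos hKlen]
        omega

-- the invariant tying A's tails array to B's dp pairs and running maximum
def pvInv (t : List Int) (dp : List (Int × Int)) (m : Int) : Prop :=
  m = (t.length : Int) ∧ t.Pairwise (· ≤ ·) ∧
  (∀ p ∈ dp, 1 ≤ p.2 ∧ p.2 ≤ (t.length : Int) ∧ t.getD (p.2 - 1).toNat 0 ≤ p.1) ∧
  (∀ k, k < t.length → ∃ p ∈ dp, p.2 = (k : Int) + 1 ∧ p.1 = t.getD k 0)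

lemma pvBest_spec (x : Int) (dp : List (Int × Int)) (init : Int) :
    init ≤ dp.foldl (fun best p => if p.1 ≤ x ∧ best < p.2 then p.2 else best) init ∧
    (dp.foldl (fun best p => if p.1 ≤ x ∧ best < p.2 then p.2 else best) init = init ∨
      ∃ p ∈ dp, p.1 ≤ x ∧ p.2 = dp.foldl (fun best p => if p.1 ≤ x ∧ best < p.2 then p.2 else best) init) ∧
    (∀ p ∈ dp, p.1 ≤ x → p.2 ≤ dp.foldl (fun best p => if p.1 ≤ x ∧ best < p.2 then p.2 else best) init) := by
  induction dp generalizing init with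
  | nil => simp
  | cons p ps ih =>
    simp only [List.foldl_cons]
    obtain ⟨h1, h2, h3⟩ := ih (if p.1 ≤ x ∧ init < p.2 then p.2 else init)
    have hle : init ≤ (if p.1 ≤ x ∧ init < p.2 then p.2 else init) := by
      split_ifs with hc
      · exact le_of_lt hc.2
      · exact le_refl _
    refine ⟨le_trans hle h1, ?_, ?_⟩
    · rcases h2 with h2 | ⟨q, hq, hqx, hqv⟩
      · by_cases hc : p.1 ≤ x ∧ init < p.2
        · right
          exact ⟨p, List.mem_cons_self, hc.1, by rw [h2]; simp [hc]⟩
        · left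
          rw [h2]
          simp [hc]
      · right
        exact ⟨q, List.mem_cons_of_mem _ hq, hqx, hqv⟩
    · intro q hq hqx
      rcases List.mem_cons.mp hq with rfl | hq'
      · refine le_trans ?_ h1
        split_ifs with hc
        · exact le_refl _
        · rw [not_and] at hc
          exact le_of_not_gt (hc hqx)
      · exact h3 q hq' hqx

lemma pvBest_spec' (x : Int) (dp : List (Int × Int)) :
    0 ≤ pvBest dp x ∧ (pvBest dp x = 0 ∨ ∃ p ∈ dp, p.1 ≤ x ∧ p.2 = pvBest dp x) ∧
    (∀ p ∈ dp, p.1 ≤ x → p.2 ≤ pvBest dp x) := by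
  unfold pvBest
  exact pvBest_spec x dp 0

lemma pvSorted_getD (t : List Int) (hs : t.Pairwise (· ≤ ·)) (i j : Nat)
    (hij : i ≤ j) (hj : j < t.length) : t.getD i 0 ≤ t.getD j 0 := by
  rcases lt_or_eq_of_le hij with h | h
  · rw [List.getD_eq_getElem t 0 (lt_trans h hj), List.getD_eq_getElem t 0 hj]
    exact List.pairwise_iff_getElem.mp hs i j (lt_trans h hj) hj h
  · rw [h]

lemma pvGetD_set (t : List Int) (K i : Nat) (x : Int) (hi : i < t.length) :
    (t.set K x).getD i 0 = if K = i then x else t.getD i 0 := by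
  rw [List.getD_eq_getElem (t.set K x) 0 (by simpa using hi), List.getElem_set]
  split_ifs with h
  · rfl
  · rw [List.getD_eq_getElem t 0 hi]

lemma pvStep_inv (t : List Int) (dp : List (Int × Int)) (m : Int) (x : Int)
    (h : pvInv t dp m) :
    pvInv (pvStepA t x) (pvStepB (dp, m) x).1 (pvStepB (dp, m) x).2 := by
  obtain ⟨hm, hsort, hub, hwit⟩ := h
  obtain ⟨hb0, hbw, hbmax⟩ := pvBest_spec' x dp
  set b := pvBest dp x with hbdef
  have hble : b ≤ (t.length : Int) := by
    rcases hbw with hb | ⟨p, hp, hpx, hpv⟩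
    · rw [hb]; exact Int.natCast_nonneg _
    · rw [← hpv]; exact (hub p hp).2.1
  have hS1 : ∀ i, i < b.toNat → t.getD i 0 ≤ x := by
    intro i hi
    rcases hbw with hb | ⟨p, hp, hpx, hpv⟩
    · omega
    · obtain ⟨h1, h2, h3⟩ := hub p hp
      have hmono : t.getD i 0 ≤ t.getD (p.2 - 1).toNat 0 :=
        pvSorted_getD t hsort i (p.2 - 1).toNat (by omega) (by omega)
      exact le_trans hmono (le_trans h3 hpx)
  have hS2 : ∀ i, b.toNat ≤ i → i < t.length → x < t.getD i 0 := by
    intro i hKi hilen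
    have hxK : x < t.getD b.toNat 0 := by
      by_contra hle
      push Not at hle
      obtain ⟨p, hp, hpv, hp1⟩ := hwit b.toNat (by omega)
      have := hbmax p hp (by rw [hp1]; exact hle)
      omega
    exact lt_of_lt_of_le hxK (pvSorted_getD t hsort b.toNat i hKi hilen)
  have hsplit : pvSplit t x b.toNat := ⟨by omega, hS1, hS2⟩
  by_cases hlen0 : t.length = 0
  · -- empty tails: dp is empty too, both sides build a one-element state
    have ht : t = [] := List.length_eq_zero_iff.mp hlen0
    subst ht
    have hdp : dp = [] := by
      cases dp with
      | nil => rfl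
      | cons p ps =>
        exfalso
        have := hub p List.mem_cons_self
        simp only [List.length_nil, Nat.cast_zero] at this
        omega
    subst hdp
    have hm0 : m = 0 := by simpa using hm
    subst hm0
    have h1 : pvStepA [] x = [x] := by simp [pvStepA]
    have h2 : pvStepB (([] : List (Int × Int)), 0) x = ([(x, 1)], 1) := by
      simp [pvStepB, pvBest]
    rw [h1, h2]
    refine ⟨by simp, by simp, ?_, ?_⟩
    · intro p hp
      simp only [List.mem_singleton] at hp
      subst hp
      norm_num
    · intro k hk
      simp only [List.length_singleton] at hk
      interval_cases k
      exact ⟨(x, 1), by simp⟩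
  · have hbK : ((b.toNat : Nat) : Int) = b := Int.toNat_of_nonneg hb0
    have hidx : pvBisect t x (t.length + 1) 0 ((t.length : Int) - 1) (-1)
        = if b.toNat < t.length then ((b.toNat : Nat) : Int) else -1 :=
      pvBisect_eq t x b.toNat hsplit (t.length + 1) 0 ((t.length : Int) - 1) (-1)
        le_rfl (by omega) (by omega) (by omega) (Or.inl ⟨rfl, rfl⟩) (by omega)
    have hstepA : pvStepA t x
        = if b.toNat < t.length then t.set b.toNat x else t ++ [x] := by
      unfold pvStepA
      rw [if_neg hlen0, hidx]
      by_cases hc : b.toNat < t.length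
      · rw [if_pos hc, if_pos (by omega : ((b.toNat : Nat) : Int) ≠ -1), if_pos hc]
        have he : (((b.toNat : Nat) : Int)).toNat = b.toNat := by omega
        rw [he]
      · rw [if_neg hc, if_neg (by simp : ¬ ((-1 : Int) ≠ -1)), if_neg hc]
    have hstepB : pvStepB (dp, m) x
        = (dp ++ [(x, b + 1)], if m < b + 1 then b + 1 else m) := rfl
    rw [hstepA, hstepB]
    by_cases hc : b.toNat < t.length
    · -- replace: tails keep their length, the maximum is unchanged
      rw [if_pos hc]
      have hm' : (if m < b + 1 then b + 1 else m) = m := by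
        rw [if_neg (by omega)]
      refine ⟨by rw [hm', hm]; simp, ?_, ?_, ?_⟩
      · rw [List.pairwise_iff_getElem]
        intro i j hi hj hij
        simp only [List.length_set] at hi hj
        rw [List.getElem_set, List.getElem_set]
        have hgi : t.getD i 0 = t[i] := List.getD_eq_getElem t 0 hi
        have hgj : t.getD j 0 = t[j] := List.getD_eq_getElem t 0 hj
        split_ifs with h1 h2 h2
        · omega
        · have := hS2 j (by omega) hj
          omega
        · have := hS1 i (by omega)
          omega
        · exact List.pairwise_iff_getElem.mp hsort i j hi hj hij
      · intro p hp
        rcases List.mem_append.mp hp with hp | hp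
        · obtain ⟨h1, h2, h3⟩ := hub p hp
          refine ⟨h1, by simpa using h2, ?_⟩
          have hplen : (p.2 - 1).toNat < t.length := by omega
          rw [pvGetD_set t b.toNat _ x hplen]
          split_ifs with hKe
          · have hx := hS2 b.toNat le_rfl hc
            rw [hKe] at hx
            exact le_of_lt (lt_of_lt_of_le hx h3)
          · exact h3
        · simp only [List.mem_singleton] at hp
          subst hp
          refine ⟨by omega, by simp only [List.length_set]; omega, ?_⟩
          have he : ((b : Int) + 1 - 1).toNat = b.toNat := by omega
          rw [he, pvGetD_set t b.toNat b.toNat x hc, if_pos rfl]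
      · intro k hk
        simp only [List.length_set] at hk
        by_cases hkK : k = b.toNat
        · refine ⟨(x, b + 1), List.mem_append_right _ (by simp), by omega, ?_⟩
          rw [pvGetD_set t b.toNat k x hk, if_pos hkK.symm]
        · obtain ⟨p, hp, h1, h2⟩ := hwit k hk
          exact ⟨p, List.mem_append_left _ hp, h1, by
            rw [h2, pvGetD_set t b.toNat k x hk, if_neg (by omega)]⟩
    · -- append: tails grow by one, the maximum grows to b + 1
      rw [if_neg hc]
      have hbeq : b = (t.length : Int) := by omega
      have hm' : (if m < b + 1 then b + 1 else m) = b + 1 := by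
        rw [if_pos (by omega)]
      refine ⟨by rw [hm']; simp; omega, ?_, ?_, ?_⟩
      · rw [List.pairwise_iff_getElem]
        intro i j hi hj hij
        simp only [List.length_append, List.length_singleton] at hi hj
        by_cases hjlen : j < t.length
        · rw [List.getElem_append_left (by omega), List.getElem_append_left hjlen]
          exact List.pairwise_iff_getElem.mp hsort i j (by omega) hjlen hij
        · have hjl : j = t.length := by omega
          rw [List.getElem_concat_length hjl, List.getElem_append_left (by omega)]
          have := hS1 i (by omega)
          have hgi : t.getD i 0 = t[i] := List.getD_eq_getElem t 0 (by omega)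
          omega
      · intro p hp
        rcases List.mem_append.mp hp with hp | hp
        · obtain ⟨h1, h2, h3⟩ := hub p hp
          refine ⟨h1, by simp only [List.length_append, List.length_singleton]; push_cast; omega, ?_⟩
          rw [List.getD_append t [x] 0 (p.2 - 1).toNat (by omega)]
          exact h3
        · simp only [List.mem_singleton] at hp
          subst hp
          refine ⟨by omega, by simp only [List.length_append, List.length_singleton]; push_cast; omega, ?_⟩
          have he : ((b : Int) + 1 - 1).toNat = t.length := by omega
          rw [he, List.getD_eq_getElem (t ++ [x]) 0 (by simp),
            List.getElem_concat_length rfl]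
      · intro k hk
        simp only [List.length_append, List.length_singleton] at hk
        by_cases hklen : k < t.length
        · obtain ⟨p, hp, h1, h2⟩ := hwit k hklen
          exact ⟨p, List.mem_append_left _ hp, h1, by
            rw [h2, List.getD_append t [x] 0 k hklen]⟩
        · have hkl : k = t.length := by omega
          refine ⟨(x, b + 1), List.mem_append_right _ (by simp), by omega, ?_⟩
          rw [List.getD_eq_getElem (t ++ [x]) 0 (by simp; omega),
            List.getElem_concat_length hkl]

lemma pvFold_inv (l : List Int) (t : List Int) (dp : List (Int × Int)) (m : Int)
    (h : pvInv t dp m) :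
    pvInv (l.foldl pvStepA t) (l.foldl pvStepB (dp, m)).1 (l.foldl pvStepB (dp, m)).2 := by
  induction l generalizing t dp m with
  | nil => exact h
  | cons y ys ih =>
      simpa using ih (pvStepA t y) (pvStepB (dp, m) y).1 (pvStepB (dp, m) y).2
        (pvStep_inv t dp m y h)

-- ===== VERDICT (by name: the statement is the Claim_ definition above) =====
theorem get_number_of_decreasing_subsequences_spec : Claim_equal_get_number_of_decreasing_subsequences := by
  intro nums _
  unfold Spec_get_number_of_decreasing_subsequences
  unfold get_number_of_decreasing_subsequences get_number_of_decreasing_subsequences_alt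
  by_cases h : nums.length = 0
  · simp [h]
  · have hinv := pvFold_inv nums [] [] 0 (by
      refine ⟨by simp, by simp, by simp, by simp⟩)
    simp only [h, if_false]
    exact hinv.1.symm
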